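-- pv_equiv track=rewrite | github.com/Loothore907/LsGG-data-extraction-workflow | web_scraper/file_storage.py | _extract_brand_from_url
-- ===== SOURCE A (Python) =====
-- def _extract_brand_from_url(url):
--     """Extract brand name from URL"""
--     # Looking at your sample URL: https://weedmaps.com/brands/enlighten/products/
--     # We'll extract 'enlighten'
--     parts = url.split('/')
--     brands_index = -1
--     for i, part in enumerate(parts):
--         if part == 'brands':
--             brands_index = i
--             break
--
--     if brands_index >= 0 and brands_index + 1 < len(parts):
--         return parts[brands_index + 1]
--     return "unknown"
-- ===== SOURCE B (Python) =====
-- def _extract_brand_from_url(url):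
--     """Extract brand name from URL"""
--     # Segment-anchored substring search: no splitting into parts.
--     s = '/' + url
--     i = s.find('/brands/')
--     if i == -1:
--         return "unknown"
--     rest = s[i + 8:]
--     j = rest.find('/')
--     return rest if j == -1 else rest[:j]
-- ===== Notes on version B (the rewrite author's own statement) =====
-- stated objective: alternative
-- what changed: Replaces split('/')-into-parts plus an index scan with a direct segment-anchored substring search: find '/brands/' in '/'+url and slice the following segment up to the next '/'.
import Mathlib
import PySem

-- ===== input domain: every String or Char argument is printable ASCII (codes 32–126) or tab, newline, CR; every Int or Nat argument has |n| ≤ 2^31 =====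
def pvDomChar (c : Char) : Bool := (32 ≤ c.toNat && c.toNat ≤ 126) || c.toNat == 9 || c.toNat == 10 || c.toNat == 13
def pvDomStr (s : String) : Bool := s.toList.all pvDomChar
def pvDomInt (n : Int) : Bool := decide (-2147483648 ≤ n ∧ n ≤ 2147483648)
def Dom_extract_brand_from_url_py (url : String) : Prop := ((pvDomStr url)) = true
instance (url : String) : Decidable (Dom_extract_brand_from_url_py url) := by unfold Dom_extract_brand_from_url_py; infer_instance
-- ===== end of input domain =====

-- B replaces A's split('/')-into-parts + index scan by a direct segment-anchored
-- substring search (find '/brands/' in '/' + url, slice out the next segment); same O(n) cost.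

-- ===== PORT A =====
-- the loop "for i, part in enumerate(parts): if part == 'brands': brands_index = i; break"
-- (brands_index stays -1 when the loop ends without breaking)
def extractLoopA : List (Int × List Char) → Int
  | [] => -1
  | (i, part) :: rest => if part = "brands".toList then i else extractLoopA rest

def extract_brand_from_url_py (url : String) : String :=
  let parts := PySem.Chars.splitOn url.toList "/".toList        -- url.split('/')
  let brands_index := extractLoopA (PySem.List.enumerate parts 0)
  if 0 ≤ brands_index ∧ brands_index + 1 < (parts.length : Int) then
    String.ofList (PySem.List.pyGetD parts (brands_index + 1) [])   -- parts[brands_index + 1]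
  else "unknown"

-- ===== PORT B =====
def extract_brand_from_url_py_alt (url : String) : String :=
  let s := '/' :: url.toList                                    -- s = '/' + url
  let i := PySem.Chars.find s "/brands/".toList                 -- s.find('/brands/')
  if i = -1 then "unknown"
  else
    let rest := PySem.List.slice s (some (i + 8)) none          -- s[i + 8:]
    let j := PySem.Chars.find rest "/".toList                   -- rest.find('/')
    if j = -1 then String.ofList rest
    else String.ofList (PySem.List.slice rest none (some j))    -- rest[:j]

-- ===== PRECONDITION & SPEC =====
def Spec_extract_brand_from_url_py (url : String) (out : String) : Prop := out = extract_brand_from_url_py_alt url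
instance (url : String) (out : String) : Decidable (Spec_extract_brand_from_url_py url out) := by unfold Spec_extract_brand_from_url_py; infer_instance

-- ===== CLAIM (what is proved, stated in full; the proofs are below) =====
def Claim_equal_extract_brand_from_url_py : Prop := ∀ (url : String), Dom_extract_brand_from_url_py url → Spec_extract_brand_from_url_py url (extract_brand_from_url_py url)

-- ===== LEMMAS AND PROOFS =====

-- functional characterisation of url.split('/')
def splitSlash : List Char → List (List Char)
  | [] => [[]]
  | c :: rest => if c = '/' then [] :: splitSlash rest else (splitSlash rest).modifyHead (c :: ·)

-- the common specification both programs compute: the segment after the first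
-- 'brands' segment of the '/'-split, else "unknown"
def gSpec : List (List Char) → String
  | x :: y :: r => if x = "brands".toList then String.ofList y else gSpec (y :: r)
  | _ => "unknown"

-- A's result as a function of the parts list
def extractAres (parts : List (List Char)) : String :=
  if 0 ≤ extractLoopA (PySem.List.enumerate parts 0) ∧
     extractLoopA (PySem.List.enumerate parts 0) + 1 < (parts.length : Int) then
    String.ofList (PySem.List.pyGetD parts (extractLoopA (PySem.List.enumerate parts 0) + 1) [])
  else "unknown"

-- B's result as a function of the character list (s = '/' :: c)
def extractBres (c : List Char) : String :=
  let s := '/' :: c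
  let i := PySem.Chars.find s "/brands/".toList
  if i = -1 then "unknown"
  else
    let rest := PySem.List.slice s (some (i + 8)) none
    let j := PySem.Chars.find rest "/".toList
    if j = -1 then String.ofList rest
    else String.ofList (PySem.List.slice rest none (some j))

lemma A_eq_Ares (url : String) :
    extract_brand_from_url_py url = extractAres (PySem.Chars.splitOn url.toList "/".toList) := rfl

lemma B_eq_Bres (url : String) :
    extract_brand_from_url_py_alt url = extractBres url.toList := rfl

lemma sep_toList : "/".toList = ['/'] := rfl
lemma pat_toList : "/brands/".toList = '/' :: "brands/".toList := rfl

lemma splitSlash_ne_nil (c : List Char) : splitSlash c ≠ [] := by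
  induction c with
  | nil => simp [splitSlash]
  | cons c rest ih =>
    simp only [splitSlash]
    split
    · simp
    · cases h : splitSlash rest with
      | nil => exact absurd h ih
      | cons y r => simp

lemma splitOn_go_eq : ∀ (fuel : Nat) (l cur : List Char) (acc : List (List Char)),
    l.length ≤ fuel →
    PySem.Chars.splitOn.go ['/'] fuel l cur acc
      = acc.reverse ++ (splitSlash l).modifyHead (cur.reverse ++ ·) := by
  intro fuel
  induction fuel with
  | zero =>
    intro l cur acc h
    have hl : l = [] := by cases l <;> simp_all
    subst hl
    simp [PySem.Chars.splitOn.go, splitSlash]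
  | succ fuel ih =>
    intro l cur acc h
    cases l with
    | nil => simp [PySem.Chars.splitOn.go, splitSlash]
    | cons c rest =>
      obtain ⟨y, r, hyr⟩ := List.exists_cons_of_ne_nil (splitSlash_ne_nil rest)
      by_cases hc : c = '/'
      · subst hc
        have hgo : PySem.Chars.splitOn.go ['/'] (fuel+1) ('/'::rest) cur acc
            = PySem.Chars.splitOn.go ['/'] fuel rest [] (cur.reverse :: acc) := by
          simp [PySem.Chars.splitOn.go, List.isPrefixOf]
        rw [hgo, ih rest [] (cur.reverse :: acc) (by simpa using Nat.le_of_succ_le_succ h)]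
        simp [splitSlash, hyr]
      · have hcc : ¬ ('/' = c) := fun e => hc e.symm
        have hgo : PySem.Chars.splitOn.go ['/'] (fuel+1) (c::rest) cur acc
            = PySem.Chars.splitOn.go ['/'] fuel rest (c :: cur) acc := by
          simp [PySem.Chars.splitOn.go, List.isPrefixOf, hcc]
        rw [hgo, ih rest (c :: cur) acc (by simpa using Nat.le_of_succ_le_succ h)]
        simp [splitSlash, hc, hyr]

lemma splitOn_eq_splitSlash (c : List Char) :
    PySem.Chars.splitOn c "/".toList = splitSlash c := by
  rw [sep_toList]
  show PySem.Chars.splitOn.go ['/'] (c.length + 1) c [] [] = splitSlash c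
  rw [splitOn_go_eq (c.length + 1) c [] [] (by omega)]
  obtain ⟨y, r, hyr⟩ := List.exists_cons_of_ne_nil (splitSlash_ne_nil c)
  simp [hyr]

-- ---- A-side: extractAres = gSpec ----

lemma loopA_cases (parts : List (List Char)) (k : Int) :
    extractLoopA (PySem.List.enumerate parts k) = -1 ∨
      ∃ n : Nat, extractLoopA (PySem.List.enumerate parts k) = k + n := by
  induction parts generalizing k with
  | nil => left; simp [PySem.List.enumerate_nil, extractLoopA]
  | cons p rest ih =>
    rw [PySem.List.enumerate_cons]
    simp only [extractLoopA]
    by_cases hp : p = "brands".toList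
    · right; exact ⟨0, by simp [hp]⟩
    · rw [if_neg hp]
      rcases ih (k+1) with h | ⟨n, h⟩
      · left; exact h
      · right; exact ⟨n+1, by rw [h]; push_cast; ring⟩

lemma loopA_shift (parts : List (List Char)) (k : Int) :
    extractLoopA (PySem.List.enumerate parts k) =
      if extractLoopA (PySem.List.enumerate parts 0) = -1 then -1
      else k + extractLoopA (PySem.List.enumerate parts 0) := by
  induction parts generalizing k with
  | nil => simp [PySem.List.enumerate_nil, extractLoopA]
  | cons p rest ih =>
    rw [PySem.List.enumerate_cons, PySem.List.enumerate_cons]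
    simp only [extractLoopA, zero_add]
    by_cases hp : p = "brands".toList
    · simp [hp]
    · rw [if_neg hp, if_neg hp, ih (k+1), ih 1]
      rcases loopA_cases rest 0 with h | ⟨n, h⟩
      · simp [h]
      · rw [h, zero_add]
        have h1 : (1:Int) + n ≠ -1 := by omega
        have h2 : (n:Int) ≠ -1 := by omega
        simp only [if_neg h1, if_neg h2]
        ring

lemma gSpec_cons_ne (x : List Char) (parts : List (List Char))
    (hx : x ≠ "brands".toList) (hp : parts ≠ []) : gSpec (x :: parts) = gSpec parts := by
  obtain ⟨y, r, rfl⟩ := List.exists_cons_of_ne_nil hp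
  simp only [gSpec]
  rw [if_neg hx]

lemma Ares_eq_gSpec (parts : List (List Char)) : extractAres parts = gSpec parts := by
  induction parts with
  | nil => simp [extractAres, gSpec, PySem.List.enumerate_nil, extractLoopA]
  | cons p rest ih =>
    unfold extractAres
    rw [PySem.List.enumerate_cons]
    simp only [extractLoopA, zero_add]
    by_cases hp : p = "brands".toList
    · rw [if_pos hp]
      cases rest with
      | nil => simp [gSpec, hp]
      | cons y r =>
        have hc : (0:Int) ≤ 0 ∧ (0:Int) + 1 < ((p::y::r).length : Int) := by
          constructor
          · omega
          · have h' : (p::y::r).length = r.length + 2 := by simp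
            omega
        rw [if_pos hc]
        have hg : PySem.List.pyGetD (p::y::r) ((0:Int) + 1) [] = y := by
          norm_num
          rw [show ((1:Int)) = ((1:Nat) : Int) by norm_num, PySem.List.pyGetD_natCast]
          rfl
        rw [hg]
        simp [gSpec, hp]
    · rw [if_neg hp, loopA_shift rest 1]
      rcases loopA_cases rest 0 with h | ⟨n, h⟩
      · rw [h, if_pos rfl]
        have hA : extractAres rest = "unknown" := by
          unfold extractAres
          rw [h, if_neg (by omega)]
        rw [if_neg (by omega)]
        cases rest with
        | nil => simp [gSpec]
        | cons y r =>
          calc "unknown" = extractAres (y::r) := hA.symm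
            _ = gSpec (y::r) := ih
            _ = gSpec (p::y::r) := (gSpec_cons_ne p (y::r) hp (by simp)).symm
      · rw [h, zero_add]
        have h2 : (n:Int) ≠ -1 := by omega
        rw [if_neg h2]
        cases rest with
        | nil =>
          exfalso
          rw [PySem.List.enumerate_nil] at h
          simp only [extractLoopA] at h
          omega
        | cons y r =>
          rw [gSpec_cons_ne p (y::r) hp (by simp), ← ih]
          unfold extractAres
          rw [h, zero_add]
          by_cases hlt : (n:Int) + 1 < (((y::r).length : Nat) : Int)
          · rw [if_pos ⟨by omega, by simp at hlt ⊢; omega⟩, if_pos ⟨by omega, hlt⟩]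
            have e1 : (1:Int) + (n:Int) + 1 = (((n+2 : Nat)) : Int) := by push_cast; ring
            have e2 : (n:Int) + 1 = (((n+1 : Nat)) : Int) := by push_cast; ring
            rw [e1, e2, PySem.List.pyGetD_natCast, PySem.List.pyGetD_natCast]
            rfl
          · rw [if_neg (by simp at hlt ⊢; omega), if_neg (by omega)]

-- ---- B-side: extractBres = gSpec ∘ splitSlash ----

lemma infix_iff_exists_drop (sub s : List Char) : sub <:+: s ↔ ∃ j, sub <+: s.drop j := by
  rw [← PySem.Chars.isIn_iff_infix, ← PySem.Chars.exists_prefix_drop_iff_isIn]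

lemma find_zero (s sub : List Char) (h : sub <+: s) : PySem.Chars.find s sub = 0 := by
  have h0 : 0 ≤ PySem.Chars.find s sub := (PySem.Chars.find_nonneg_iff s sub).mpr h.isInfix
  obtain ⟨hp, hmin⟩ := PySem.Chars.find_spec h0
  by_contra hne
  have hpos : 0 < (PySem.Chars.find s sub).toNat := by omega
  exact hmin 0 hpos (by simpa using h)

lemma find_shift (a b sub : List Char)
    (hno : ∀ i < a.length, ¬ sub <+: (a ++ b).drop i) :
    PySem.Chars.find (a ++ b) sub =
      if PySem.Chars.find b sub = -1 then -1
      else (a.length : Int) + PySem.Chars.find b sub := by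
  by_cases hb : PySem.Chars.find b sub = -1
  · rw [if_pos hb]
    rw [PySem.Chars.find_eq_neg_one_iff] at hb ⊢
    intro hinf
    obtain ⟨j, hj⟩ := (infix_iff_exists_drop _ _).mp hinf
    by_cases hja : j < a.length
    · exact hno j hja hj
    · apply hb
      apply (infix_iff_exists_drop _ _).mpr
      refine ⟨j - a.length, ?_⟩
      have hdr : (a ++ b).drop j = b.drop (j - a.length) := by
        conv_lhs => rw [show j = a.length + (j - a.length) by omega]
        exact List.drop_length_add_append _
      rwa [hdr] at hj
  · rw [if_neg hb]
    have hb0 : 0 ≤ PySem.Chars.find b sub :=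
      (PySem.Chars.find_nonneg_iff b sub).mpr ((PySem.Chars.find_ne_neg_one_iff b sub).mp hb)
    obtain ⟨hbp, hbmin⟩ := PySem.Chars.find_spec hb0
    have hpre : sub <+: (a ++ b).drop (a.length + (PySem.Chars.find b sub).toNat) := by
      rw [List.drop_length_add_append]; exact hbp
    have h0 : 0 ≤ PySem.Chars.find (a ++ b) sub := by
      apply (PySem.Chars.find_nonneg_iff _ _).mpr
      exact (infix_iff_exists_drop _ _).mpr ⟨a.length + (PySem.Chars.find b sub).toNat, hpre⟩
    obtain ⟨hq, hqmin⟩ := PySem.Chars.find_spec h0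
    have hq1 : (PySem.Chars.find (a ++ b) sub).toNat ≤ a.length + (PySem.Chars.find b sub).toNat := by
      by_contra hcon
      exact hqmin (a.length + (PySem.Chars.find b sub).toNat) (by omega) hpre
    have hq2 : a.length ≤ (PySem.Chars.find (a ++ b) sub).toNat := by
      by_contra hcon
      exact hno _ (by omega) hq
    have hq3 : (PySem.Chars.find b sub).toNat ≤ (PySem.Chars.find (a ++ b) sub).toNat - a.length := by
      by_contra hcon
      apply hbmin ((PySem.Chars.find (a ++ b) sub).toNat - a.length) (by omega)
      have hdr : (a ++ b).drop (PySem.Chars.find (a ++ b) sub).toNat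
          = b.drop ((PySem.Chars.find (a ++ b) sub).toNat - a.length) := by
        conv_lhs => rw [show (PySem.Chars.find (a ++ b) sub).toNat
          = a.length + ((PySem.Chars.find (a ++ b) sub).toNat - a.length) by omega]
        exact List.drop_length_add_append _
      rwa [hdr] at hq
    omega

lemma find_no_slash (t : List Char) (h : ('/' : Char) ∉ t) : PySem.Chars.find t ['/'] = -1 := by
  rw [PySem.Chars.find_eq_neg_one_iff]
  intro hinf
  exact h ((List.singleton_infix_iff '/' t).mp hinf)

lemma head_ne_slash_no_prefix (x b q : List Char) (i : Nat)
    (hi : i < x.length) (hx : ('/' : Char) ∉ x) :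
    ¬ ('/' :: q) <+: (x ++ b).drop i := by
  intro h
  obtain ⟨t, ht, -⟩ := List.cons_prefix_iff.mp h
  have h1 : ((x ++ b).drop i).head? = some '/' := by rw [ht]; rfl
  rw [List.head?_drop] at h1
  have h2 : (x ++ b)[i]? = some x[i] := by
    rw [List.getElem?_append_left hi]
    simp
  rw [h2] at h1
  have h3 : x[i] = '/' := by injection h1
  exact hx (h3 ▸ List.getElem_mem hi)

lemma find_first_slash (x u : List Char) (hx : ('/' : Char) ∉ x) :
    PySem.Chars.find (x ++ '/'::u) ['/'] = (x.length : Int) := by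
  rw [find_shift x ('/'::u) ['/']
      (fun i hi => head_ne_slash_no_prefix x ('/'::u) [] i hi hx)]
  rw [find_zero ('/'::u) ['/'] ⟨u, rfl⟩]
  norm_num

lemma splitSlash_no_slash (t : List Char) (h : ('/' : Char) ∉ t) : splitSlash t = [t] := by
  induction t with
  | nil => rfl
  | cons c r ih =>
    simp only [List.mem_cons, not_or] at h
    have hc : ¬ c = '/' := fun e => h.1 e.symm
    rw [splitSlash, if_neg hc, ih h.2]
    rfl

lemma splitSlash_append (x u : List Char) (hx : ('/' : Char) ∉ x) :
    splitSlash (x ++ '/'::u) = x :: splitSlash u := by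
  induction x with
  | nil => simp [splitSlash]
  | cons c x' ih =>
    simp only [List.mem_cons, not_or] at hx
    have hc : ¬ c = '/' := fun e => hx.1 e.symm
    rw [List.cons_append, splitSlash, if_neg hc, ih hx.2]
    rfl

lemma slash_decomp (c : List Char) (h : ('/' : Char) ∈ c) :
    ∃ x u, c = x ++ '/'::u ∧ ('/' : Char) ∉ x := by
  induction c with
  | nil => simp at h
  | cons a r ih =>
    by_cases ha : a = '/'
    · exact ⟨[], r, by rw [ha]; rfl, by simp⟩
    · have hr : ('/' : Char) ∈ r := by
        rcases List.mem_cons.mp h with h1 | h1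
        · exact absurd h1.symm ha
        · exact h1
      obtain ⟨x, u, he, hx⟩ := ih hr
      refine ⟨a::x, u, by rw [he]; rfl, ?_⟩
      simp only [List.mem_cons, not_or]
      exact ⟨fun e => ha e.symm, hx⟩

lemma pat_infix_mem (c : List Char) (h : "/brands/".toList <:+: ('/' :: c)) : ('/' : Char) ∈ c := by
  obtain ⟨j, hj⟩ := (infix_iff_exists_drop _ _).mp h
  cases j with
  | zero =>
    obtain ⟨t, ht⟩ := hj
    simp only [List.drop_zero] at ht
    rw [pat_toList] at ht
    have hc : "brands/".toList ++ t = c := by simpa using ht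
    rw [← hc]
    exact List.mem_append_left _ (by decide)
  | succ j' =>
    obtain ⟨t, ht⟩ := hj
    rw [List.drop_succ_cons] at ht
    have hm : ('/' : Char) ∈ List.drop j' c := by
      rw [← ht, pat_toList]
      simp
    exact List.mem_of_mem_drop hm

lemma head_seg (t y : List Char) (r : List (List Char)) (h : splitSlash t = y :: r) :
    (if PySem.Chars.find t ['/'] = -1 then t
     else PySem.List.slice t none (some (PySem.Chars.find t ['/']))) = y := by
  by_cases hm : ('/' : Char) ∈ t
  · obtain ⟨x, u, he, hx⟩ := slash_decomp t hm
    subst he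
    rw [find_first_slash x u hx, if_neg (by omega), PySem.List.slice_to_natCast, List.take_left]
    rw [splitSlash_append x u hx] at h
    exact ((List.cons.injEq _ _ _ _).mp h).1
  · rw [if_pos (find_no_slash t hm)]
    rw [splitSlash_no_slash t hm] at h
    exact ((List.cons.injEq _ _ _ _).mp h).1

lemma Bres_eq_gSpec_aux : ∀ (n : Nat) (c : List Char), c.length ≤ n →
    extractBres c = gSpec (splitSlash c) := by
  intro n
  induction n with
  | zero =>
    intro c h
    have hc : c = [] := by cases c <;> simp_all
    subst hc
    decide
  | succ n ih =>
    intro c hlen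
    by_cases hpre : "brands/".toList <+: c
    · obtain ⟨t, ht⟩ := hpre
      have hs : ('/' :: c) = "/brands/".toList ++ t := by rw [← ht]; rfl
      have hfind : PySem.Chars.find ('/'::c) "/brands/".toList = 0 := by
        rw [hs]; exact find_zero _ _ ⟨t, rfl⟩
      have hrest : PySem.List.slice ('/'::c) (some ((0:Int) + 8)) none = t := by
        rw [PySem.List.slice_from ('/'::c) (show (0:Int) ≤ 0 + 8 by norm_num)]
        rw [hs, show ((0:Int) + 8).toNat = ("/brands/".toList).length from rfl, List.drop_left]
      have hc2 : c = "brands".toList ++ '/'::t := by rw [← ht]; rfl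
      have hsplit : splitSlash c = "brands".toList :: splitSlash t := by
        rw [hc2]; exact splitSlash_append _ _ (by decide)
      obtain ⟨y, r, hyr⟩ := List.exists_cons_of_ne_nil (splitSlash_ne_nil t)
      simp only [extractBres]
      rw [hfind, if_neg (by omega), hrest, sep_toList]
      rw [hsplit, hyr]
      simp only [gSpec]
      rw [← apply_ite String.ofList]
      exact congrArg String.ofList (head_seg t y r hyr)
    · by_cases hm : ('/' : Char) ∈ c
      · obtain ⟨x, u, he, hx⟩ := slash_decomp c hm
        have hxbr : x ≠ "brands".toList := by
          intro e
          apply hpre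
          refine ⟨u, ?_⟩
          rw [he, e]
          rfl
        have hs : ('/' :: c) = ('/'::x) ++ ('/'::u) := by rw [he]; rfl
        have hno : ∀ i < ('/'::x).length,
            ¬ "/brands/".toList <+: (('/'::x) ++ ('/'::u)).drop i := by
          intro i hi hp
          match i with
          | 0 =>
            simp only [List.drop_zero] at hp
            rw [pat_toList] at hp
            obtain ⟨t', ht', hp'⟩ := List.cons_prefix_iff.mp hp
            have ht'' : t' = x ++ '/'::u := by
              have : ('/'::x) ++ ('/'::u) = '/' :: (x ++ '/'::u) := rfl
              rw [this] at ht'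
              exact ((List.cons.injEq _ _ _ _).mp ht').2.symm
            apply hpre
            rw [he]
            rw [ht''] at hp'
            exact hp'
          | Nat.succ i' =>
            have hi' : i' < x.length := by simp at hi; omega
            have hdr : (('/'::x) ++ ('/'::u)).drop (i'+1) = (x ++ ('/'::u)).drop i' := rfl
            rw [hdr, pat_toList] at hp
            exact head_ne_slash_no_prefix x ('/'::u) _ i' hi' hx hp
        have hshift := find_shift ('/'::x) ('/'::u) "/brands/".toList hno
        have hulen : u.length ≤ n := by
          have : c.length = x.length + 1 + u.length := by rw [he]; simp; omega
          omega
        have ihu := ih u hulen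
        have hsplit : splitSlash c = x :: splitSlash u := by
          rw [he]; exact splitSlash_append x u hx
        have hgs : gSpec (splitSlash c) = gSpec (splitSlash u) := by
          rw [hsplit]
          exact gSpec_cons_ne x _ hxbr (splitSlash_ne_nil u)
        by_cases hf : PySem.Chars.find ('/'::u) "/brands/".toList = -1
        · have hfc : PySem.Chars.find ('/'::c) "/brands/".toList = -1 := by
            rw [hs, hshift, if_pos hf]
          have hBu : extractBres u = "unknown" := by
            simp only [extractBres]
            rw [hf, if_pos rfl]
          simp only [extractBres]
          rw [hfc, if_pos rfl, hgs, ← ihu, hBu]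
        · have hf0 : 0 ≤ PySem.Chars.find ('/'::u) "/brands/".toList :=
            (PySem.Chars.find_nonneg_iff _ _).mpr ((PySem.Chars.find_ne_neg_one_iff _ _).mp hf)
          have hfc : PySem.Chars.find ('/'::c) "/brands/".toList
              = ((('/'::x).length : Int)) + PySem.Chars.find ('/'::u) "/brands/".toList := by
            rw [hs, hshift, if_neg hf]
          have hrest : PySem.List.slice ('/'::c)
                (some (((('/'::x).length : Int)) + PySem.Chars.find ('/'::u) "/brands/".toList + 8)) none
              = PySem.List.slice ('/'::u)
                (some (PySem.Chars.find ('/'::u) "/brands/".toList + 8)) none := by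
            rw [PySem.List.slice_from ('/'::c)
                  (show (0:Int) ≤ ((('/'::x).length : Int)) + PySem.Chars.find ('/'::u) "/brands/".toList + 8 by
                    have := hf0; omega),
                PySem.List.slice_from ('/'::u)
                  (show (0:Int) ≤ PySem.Chars.find ('/'::u) "/brands/".toList + 8 by omega),
                hs]
            rw [show (((('/'::x).length : Int)) + PySem.Chars.find ('/'::u) "/brands/".toList + 8).toNat
                = ('/'::x).length + (PySem.Chars.find ('/'::u) "/brands/".toList + 8).toNat by omega]
            rw [List.drop_length_add_append]
          simp only [extractBres] at ihu ⊢
          rw [if_neg hf] at ihu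
          rw [hfc, if_neg (by omega), hrest, hgs]
          exact ihu
      · have hfc : PySem.Chars.find ('/'::c) "/brands/".toList = -1 := by
          rw [PySem.Chars.find_eq_neg_one_iff]
          intro hinf
          exact hm (pat_infix_mem c hinf)
        simp only [extractBres]
        rw [hfc, if_pos rfl, splitSlash_no_slash c hm]
        rfl

-- ===== VERDICT (by name: the statement is the Claim_ definition above) =====
theorem extract_brand_from_url_py_spec : Claim_equal_extract_brand_from_url_py := by
  intro url _
  show extract_brand_from_url_py url = extract_brand_from_url_py_alt url
  rw [A_eq_Ares, B_eq_Bres, Ares_eq_gSpec, splitOn_eq_splitSlash,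
    Bres_eq_gSpec_aux url.toList.length url.toList le_rfl]
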